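-- pv_equiv track=rewrite | github.com/ljb2208/osr-rover-code | osr/scripts/ocs/machine.py | escape_ansi
-- ===== SOURCE A (Python) =====
-- def escape_ansi(info):
--     r = ""
--     dataStarted = False
--
--     for c in info:
--         if ord(c) == 32:
--             dataStarted = True
--         elif ord(c) < 28:
--             dataStarted = False
--
--         if dataStarted:
--             r += c
--     return r
-- ===== SOURCE B (Python) =====
-- def escape_ansi(info):
--     # Partition info into maximal control-free segments (control = ord < 28),
--     # then keep each segment's tail starting at its first space.
--     segments = []
--     current = []
--     for c in info:
--         if ord(c) < 28:
--             segments.append(''.join(current))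
--             current = []
--         else:
--             current.append(c)
--     segments.append(''.join(current))
--     out = []
--     for seg in segments:
--         i = seg.find(' ')
--         if i != -1:
--             out.append(seg[i:])
--     return ''.join(out)
-- ===== Notes on version B (the rewrite author's own statement) =====
-- stated objective: alternative
-- what changed: Replaced the flag-driven character loop with an explicit partition of the input into control-free segments (ord<28 as delimiters) followed by keeping each segment's tail from its first space.
import Mathlib
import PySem

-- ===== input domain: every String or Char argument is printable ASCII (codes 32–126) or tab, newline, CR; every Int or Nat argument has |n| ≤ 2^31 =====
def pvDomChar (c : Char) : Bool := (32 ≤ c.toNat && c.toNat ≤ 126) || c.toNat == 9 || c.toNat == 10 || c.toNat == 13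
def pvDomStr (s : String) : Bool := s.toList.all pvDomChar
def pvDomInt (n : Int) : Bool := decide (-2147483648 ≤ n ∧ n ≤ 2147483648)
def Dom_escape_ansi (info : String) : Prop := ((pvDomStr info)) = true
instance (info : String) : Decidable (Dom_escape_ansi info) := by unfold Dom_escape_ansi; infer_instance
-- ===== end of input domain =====

-- B partitions the input into control-free segments and keeps each segment's tail
-- from its first space — an alternative decomposition of A's flag-driven loop.


-- ===== PORT A =====
-- A's for-loop over the string with state (r, dataStarted)
def escapeAnsiGo : List Char → List Char → Bool → List Char
  | [], r, _ => r
  | c :: cs, r, ds =>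
    let ds' := if c.toNat == 32 then true
               else if c.toNat < 28 then false
               else ds
    if ds' then escapeAnsiGo cs (r ++ [c]) ds' else escapeAnsiGo cs r ds'

def escape_ansi (info : String) : String :=
  String.mk (escapeAnsiGo info.toList [] false)

-- ===== PORT B =====
-- B's first loop: split into maximal control-free segments (control chars dropped)
def segsLoop : List Char → List Char → List (List Char)
  | [], cur => [cur]
  | c :: cs, cur =>
    if c.toNat < 28 then cur :: segsLoop cs []
    else segsLoop cs (cur ++ [c])

-- B's second loop body: seg.find(' ') then seg[i:], nothing if absent
def segTail (seg : List Char) : List Char :=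
  match seg.idxOf? ' ' with
  | some i => seg.drop i
  | none => []

def escape_ansi_alt (info : String) : String :=
  String.mk (((segsLoop info.toList []).map segTail).flatten)

-- ===== PRECONDITION & SPEC =====
def Spec_escape_ansi (info : String) (out : String) : Prop := out = escape_ansi_alt info
instance (info : String) (out : String) : Decidable (Spec_escape_ansi info out) := by unfold Spec_escape_ansi; infer_instance

-- ===== CLAIM (what is proved, stated in full; the proofs are below) =====
def Claim_equal_escape_ansi : Prop := ∀ (info : String), Dom_escape_ansi info → Spec_escape_ansi info (escape_ansi info)

-- ===== LEMMAS AND PROOFS =====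

-- Emission of A's loop without the accumulator
def aEmit : List Char → Bool → List Char
  | [], _ => []
  | c :: cs, ds =>
    let ds' := if c.toNat == 32 then true
               else if c.toNat < 28 then false
               else ds
    (if ds' then [c] else []) ++ aEmit cs ds'

theorem escapeAnsiGo_eq_aEmit (cs : List Char) : ∀ (r : List Char) (ds : Bool),
    escapeAnsiGo cs r ds = r ++ aEmit cs ds := by
  induction cs with
  | nil => intro r ds; simp [escapeAnsiGo, aEmit]
  | cons c cs ih =>
    intro r ds
    simp only [escapeAnsiGo, aEmit]
    split_ifs <;> simp [ih]

-- structural form of segTail: drop up to the first space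
def dw : List Char → List Char
  | [] => []
  | c :: cs => if c = ' ' then c :: cs else dw cs

theorem segTail_eq_dw (seg : List Char) : segTail seg = dw seg := by
  induction seg with
  | nil => rfl
  | cons c cs ih =>
    by_cases h : c = ' '
    · subst h
      simp [segTail, List.idxOf?, List.findIdx?_cons, dw]
    · have hb : (c == ' ') = false := by simp [h]
      cases hx : List.findIdx? (fun x => x == ' ') cs with
      | none =>
        have h0 : segTail cs = [] := by simp [segTail, List.idxOf?, hx]
        have h1 : dw cs = [] := by rw [← ih, h0]
        simp [segTail, List.idxOf?, List.findIdx?_cons, hb, hx, dw, h, h1]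
      | some i =>
        have h0 : segTail cs = List.drop i cs := by simp [segTail, List.idxOf?, hx]
        have h1 : segTail (c :: cs) = List.drop i cs := by
          simp [segTail, List.idxOf?, List.findIdx?_cons, hb, hx]
        rw [h1]
        simp only [dw, if_neg h]
        rw [← ih, h0]

theorem dw_nil_of_not_mem (seg : List Char) (h : ' ' ∉ seg) : dw seg = [] := by
  induction seg with
  | nil => rfl
  | cons c cs ih =>
    simp only [List.mem_cons, not_or] at h
    have hc : ¬ c = ' ' := fun he => h.1 he.symm
    simp [dw, hc, ih h.2]

theorem dw_append_of_mem (seg l : List Char) (h : ' ' ∈ seg) :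
    dw (seg ++ l) = dw seg ++ l := by
  induction seg with
  | nil => simp at h
  | cons c cs ih =>
    by_cases hc : c = ' '
    · simp [dw, hc]
    · have : ' ' ∈ cs := by
        rcases List.mem_cons.1 h with h1 | h1
        · exact absurd h1.symm hc
        · exact h1
      simp [dw, hc, ih this]

theorem dw_append_of_not_mem (seg l : List Char) (h : ' ' ∉ seg) :
    dw (seg ++ l) = dw l := by
  induction seg with
  | nil => rfl
  | cons c cs ih =>
    simp only [List.mem_cons, not_or] at h
    have hc : ¬ c = ' ' := fun he => h.1 he.symm
    simp [dw, hc, ih h.2]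

theorem segTail_append (seg : List Char) (c : Char) :
    segTail (seg ++ [c]) =
      if ' ' ∈ seg then segTail seg ++ [c]
      else if c = ' ' then [c] else [] := by
  rw [segTail_eq_dw, segTail_eq_dw]
  by_cases h : ' ' ∈ seg
  · rw [if_pos h, dw_append_of_mem seg [c] h]
  · rw [if_neg h, dw_append_of_not_mem seg [c] h]
    by_cases hc : c = ' ' <;> simp [dw, hc]

theorem segTail_of_not_mem (seg : List Char) (h : ¬ ' ' ∈ seg) : segTail seg = [] := by
  rw [segTail_eq_dw]; exact dw_nil_of_not_mem seg h

theorem main_lemma (cs : List Char) : ∀ (cur : List Char),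
    ((segsLoop cs cur).map segTail).flatten = segTail cur ++ aEmit cs (decide (' ' ∈ cur)) := by
  induction cs with
  | nil => intro cur; simp [segsLoop, aEmit]
  | cons c cs ih =>
    intro cur
    simp only [segsLoop, aEmit]
    by_cases hctl : c.toNat < 28
    · have h32 : (c.toNat == 32) = false := by
        simp; omega
      simp [hctl, h32, ih, segTail, List.idxOf?]
    · by_cases hsp : c = ' '
      · subst hsp
        have h32 : ((' ').toNat == 32) = true := by decide
        simp only [hctl, if_false, h32, if_true, ih]
        rw [segTail_append]
        by_cases hm : ' ' ∈ cur
        · rw [if_pos hm]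
          have hd : decide (' ' ∈ cur ++ [' ']) = true := decide_eq_true (by simp)
          rw [hd, List.append_assoc]
        · rw [if_neg hm]
          have hd : decide (' ' ∈ cur ++ [' ']) = true := decide_eq_true (by simp)
          rw [hd, segTail_of_not_mem cur hm, if_pos rfl]
          simp only [List.nil_append]
      · have h32 : (c.toNat == 32) = false := by
          apply beq_eq_false_iff_ne.2
          intro hx
          apply hsp
          calc c = Char.ofNat c.toNat := (Char.ofNat_toNat c).symm
            _ = Char.ofNat 32 := by rw [hx]
            _ = ' ' := by decide
        simp only [hctl, if_false, h32, ih]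
        rw [segTail_append]
        have hms : (' ' = c) = False := by
          simp [eq_comm, hsp]
        by_cases hm : ' ' ∈ cur
        · rw [if_pos hm]; simp [hm, hms]
        · rw [if_neg hm]; simp [hm, hsp, hms, segTail_of_not_mem cur hm]

-- ===== VERDICT (by name: the statement is the Claim_ definition above) =====
theorem escape_ansi_spec : Claim_equal_escape_ansi := by
  intro info _
  unfold Spec_escape_ansi escape_ansi escape_ansi_alt
  rw [escapeAnsiGo_eq_aEmit, main_lemma]
  simp [segTail]
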